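-- pv_equiv track=rewrite | github.com/KIAND-glitch/COMP10001-Project1 | SpeciesRichness.py | get_species_richness
-- ===== SOURCE A (Python) =====
-- def get_species_richness(observed_list):
--     '''accepts a list of bird species observed in a habitat and then calculates
--     and returns the number of different species obeserved and also returns a
--     alphabetically sorted list of the different species as a tuple'''
--
--     # creating a dictionary to store the different species and the number of
--     # times they are obeserved in the habitat
--     species_dictionary = {}
--
--     for species_observed in observed_list:
--         if species_observed in species_dictionary:
--             species_dictionary[species_observed] += 1
--         else:
--             species_dictionary[species_observed] = 1
--
--     # sorts it alphabetically
--     species = sorted(species_dictionary.keys())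
--
--     species_count = len(species)
--
--     return species_count, species
-- ===== SOURCE B (Python) =====
-- def get_species_richness(observed_list):
--     '''Sort the observations first, then collapse equal neighbours in one
--     linear pass; returns (number of distinct species, sorted distinct list).'''
--     species = []
--     for species_observed in sorted(observed_list):
--         if not species or species[-1] != species_observed:
--             species.append(species_observed)
--     return len(species), species
-- ===== Notes on version B (the rewrite author's own statement) =====
-- stated objective: alternative
-- what changed: Replaces A's count-dictionary build followed by sorting its keys with sort-first then a single adjacent-deduplication pass over the sorted list; no dictionary is built.
import Mathlib
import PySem

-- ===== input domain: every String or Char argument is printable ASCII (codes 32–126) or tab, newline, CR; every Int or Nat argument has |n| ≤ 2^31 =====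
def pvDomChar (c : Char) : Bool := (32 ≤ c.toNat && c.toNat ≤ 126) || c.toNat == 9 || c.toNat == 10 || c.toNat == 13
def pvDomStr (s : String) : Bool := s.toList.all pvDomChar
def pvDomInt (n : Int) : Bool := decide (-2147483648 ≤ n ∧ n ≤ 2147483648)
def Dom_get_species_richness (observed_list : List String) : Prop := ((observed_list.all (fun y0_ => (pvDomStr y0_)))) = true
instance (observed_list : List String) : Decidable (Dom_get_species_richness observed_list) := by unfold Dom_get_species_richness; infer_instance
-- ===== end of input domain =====

-- B replaces A's count-dictionary-then-sort-keys with sort-first then one adjacent-dedup pass (alternative decomposition, same result).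

-- ===== PORT A =====
def get_species_richness (observed_list : List String) : Int × List String :=
  let species_dictionary : PySem.Dict String Int :=
    observed_list.foldl
      (fun d s => if d.contains s then d.modify s 0 (· + 1) else d.insert s 1)
      PySem.Dict.empty
  let species := PySem.List.sorted species_dictionary.keys (fun x => x) false
  ((species.length : Int), species)

-- ===== PORT B =====
def get_species_richness_alt (observed_list : List String) : Int × List String :=
  let species :=
    (PySem.List.sorted observed_list (fun x => x) false).foldl
      (fun acc s => if acc = [] ∨ acc.getLast? ≠ some s then acc ++ [s] else acc)
      []
  ((species.length : Int), species)

-- ===== PRECONDITION & SPEC =====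
def Spec_get_species_richness (observed_list : List String) (out : Int × List String) : Prop := out = get_species_richness_alt observed_list
instance (observed_list : List String) (out : Int × List String) : Decidable (Spec_get_species_richness observed_list out) := by unfold Spec_get_species_richness; infer_instance

-- ===== CLAIM (what is proved, stated in full; the proofs are below) =====
def Claim_equal_get_species_richness : Prop := ∀ (observed_list : List String), Dom_get_species_richness observed_list → Spec_get_species_richness observed_list (get_species_richness observed_list)

-- ===== LEMMAS AND PROOFS =====

-- A's dict-building loop: its keys are exactly set-update of the starting keys by the input.
theorem pv_keysA (xs : List String) (d : PySem.Dict String Int) :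
    (xs.foldl (fun d s => if d.contains s then d.modify s 0 (· + 1) else d.insert s 1) d).keys
      = PySem.Set.update d.keys xs := by
  induction xs generalizing d with
  | nil => simp [PySem.Set.update]
  | cons x t ih =>
    rw [List.foldl_cons]
    by_cases h : d.contains x = true
    · rw [if_pos h, ih]
      have hmem : x ∈ d.keys := (PySem.Dict.contains_iff_mem_keys d x).mp h
      have hk : (d.modify x 0 (· + 1)).keys = d.keys := by
        simp only [PySem.Dict.keys_modify]
        exact PySem.Dict.keys_insert_of_contains _ _ h
      rw [hk]
      simp [PySem.Set.update, PySem.Set.add, hmem]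
    · rw [if_neg h, ih]
      have hb : d.contains x = false := by simpa using h
      have hmem : x ∉ d.keys := fun hm => h ((PySem.Dict.contains_iff_mem_keys d x).mpr hm)
      rw [PySem.Dict.keys_insert_of_not_contains]
      · simp [PySem.Set.update, PySem.Set.add, hmem]
      · exact hb

-- In a strictly increasing list, an element that bounds all others is the last one.
theorem pv_getLast_of_max (acc : List String) (x : String)
    (hs : acc.Pairwise (· < ·)) (hx : x ∈ acc) (hmax : ∀ a ∈ acc, a ≤ x) :
    acc.getLast? = some x := by
  induction acc with
  | nil => cases hx
  | cons a t ih =>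
    cases t with
    | nil =>
      simp at hx
      simp [hx]
    | cons b u =>
      have hs' := (List.pairwise_cons.mp hs)
      rcases List.mem_cons.mp hx with h1 | h2
      · exfalso
        have hab : a < b := hs'.1 b (by simp)
        have hbx : b ≤ x := hmax b (by simp)
        subst h1
        exact absurd (lt_of_lt_of_le hab hbx) (lt_irrefl x)
      · have := ih hs'.2 h2 (fun a ha => hmax a (List.mem_cons_of_mem _ ha))
        simpa [List.getLast?] using this

-- B's adjacent-dedup fold: keeps strict sortedness and has the union membership.
theorem pv_dedup_fold (l acc : List String)
    (hacc : acc.Pairwise (· < ·))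
    (hle : ∀ a ∈ acc, ∀ z ∈ l, a ≤ z)
    (hl : l.Pairwise (· ≤ ·)) :
    (l.foldl (fun acc s => if acc = [] ∨ acc.getLast? ≠ some s then acc ++ [s] else acc) acc).Pairwise (· < ·)
    ∧ ∀ y, (y ∈ l.foldl (fun acc s => if acc = [] ∨ acc.getLast? ≠ some s then acc ++ [s] else acc) acc
            ↔ y ∈ acc ∨ y ∈ l) := by
  induction l generalizing acc with
  | nil => exact ⟨hacc, fun y => by simp⟩
  | cons hd t ih =>
    rw [List.foldl_cons]
    have hl' := List.pairwise_cons.mp hl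
    by_cases hc : acc = [] ∨ acc.getLast? ≠ some hd
    · rw [if_pos hc]
      have hacc' : (acc ++ [hd]).Pairwise (· < ·) := by
        rw [List.pairwise_append]
        refine ⟨hacc, List.pairwise_singleton _ _, ?_⟩
        intro a ha b hb
        have hb' : b = hd := by simpa using hb
        subst hb'
        have hax : a ≤ b := hle a ha b (by simp)
        rcases lt_or_eq_of_le hax with hlt | heq
        · exact hlt
        · exfalso
          subst heq
          have hlast := pv_getLast_of_max acc a hacc ha (fun c hcm => hle c hcm a (by simp))
          rcases hc with h0 | hne
          · rw [h0] at ha; cases ha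
          · exact hne hlast
      have hle' : ∀ a ∈ acc ++ [hd], ∀ z ∈ t, a ≤ z := by
        intro a ha z hz
        rcases List.mem_append.mp ha with hmem | hmem
        · exact hle a hmem z (List.mem_cons_of_mem _ hz)
        · have : a = hd := by simpa using hmem
          subst this; exact hl'.1 z hz
      obtain ⟨p1, p2⟩ := ih (acc ++ [hd]) hacc' hle' hl'.2
      refine ⟨p1, fun y => ?_⟩
      rw [p2 y]
      simp [List.mem_append, or_assoc]
    · rw [if_neg hc]
      push Not at hc
      have hx_mem : hd ∈ acc := List.mem_of_getLast? hc.2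
      have hle' : ∀ a ∈ acc, ∀ z ∈ t, a ≤ z :=
        fun a ha z hz => hle a ha z (List.mem_cons_of_mem _ hz)
      obtain ⟨p1, p2⟩ := ih acc hacc hle' hl'.2
      refine ⟨p1, fun y => ?_⟩
      rw [p2 y]
      constructor
      · tauto
      · rintro (hy | hy)
        · exact Or.inl hy
        · rcases List.mem_cons.mp hy with hy | hy
          · subst hy; exact Or.inl hx_mem
          · exact Or.inr hy

-- ===== VERDICT (by name: the statement is the Claim_ definition above) =====
theorem get_species_richness_spec : Claim_equal_get_species_richness := by
  intro observed_list _
  unfold Spec_get_species_richness get_species_richness get_species_richness_alt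
  have hkeys :
      (observed_list.foldl (fun d s => if d.contains s then d.modify s 0 (· + 1) else d.insert s 1)
        (PySem.Dict.empty : PySem.Dict String Int)).keys = PySem.Set.ofList observed_list := by
    rw [pv_keysA]
    simp [PySem.Dict.keys_empty, PySem.Set.update_nil_left]
  obtain ⟨hpw, hmem⟩ := pv_dedup_fold (PySem.List.sorted observed_list (fun x => x) false) []
      (List.Pairwise.nil) (by simp)
      (by simpa using PySem.List.sorted_pairwise observed_list (fun x => x))
  set r := (PySem.List.sorted observed_list (fun x => x) false).foldl
      (fun acc s => if acc = [] ∨ acc.getLast? ≠ some s then acc ++ [s] else acc) [] with hr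
  have hperm : r.Perm (PySem.Set.ofList observed_list) := by
    have hnr : r.Nodup := hpw.imp ne_of_lt
    have hns : (PySem.Set.ofList observed_list).Nodup := PySem.Set.nodup_ofList _
    rw [List.perm_ext_iff_of_nodup hnr hns]
    intro y
    rw [hmem y]
    simp [PySem.List.mem_sorted, PySem.Set.mem_ofList]
  have hsorted : PySem.List.sorted (PySem.Set.ofList observed_list) (fun x => x) false = r :=
    PySem.List.sorted_eq_of_perm_of_pairwise_lt _ _ _ hperm hpw
  simp only [hkeys, hsorted]
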